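-- pv_equiv track=rewrite | github.com/mcoslet/coding_bat_py | list_2/has22.py | has22
-- ===== SOURCE A (Python) =====
-- def has22(arr):
--     if len(arr) <= 1:
--         return False
--     is22 = False
--     for i in range(len(arr) - 1):
--         if arr[i] == 2 and arr[i+1] == 2:
--             is22 = True
--             break
--     return is22
-- ===== SOURCE B (Python) =====
-- def has22(arr):
--     pos = [i for i, x in enumerate(arr) if x == 2]
--     return any(b - a == 1 for a, b in zip(pos, pos[1:]))
-- ===== Notes on version B (the rewrite author's own statement) =====
-- stated objective: alternative
-- what changed: Replaces the guarded index loop over adjacent pairs with a collect-then-scan decomposition: first gather the indices of all 2s, then check whether two collected indices differ by exactly 1.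
import Mathlib
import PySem

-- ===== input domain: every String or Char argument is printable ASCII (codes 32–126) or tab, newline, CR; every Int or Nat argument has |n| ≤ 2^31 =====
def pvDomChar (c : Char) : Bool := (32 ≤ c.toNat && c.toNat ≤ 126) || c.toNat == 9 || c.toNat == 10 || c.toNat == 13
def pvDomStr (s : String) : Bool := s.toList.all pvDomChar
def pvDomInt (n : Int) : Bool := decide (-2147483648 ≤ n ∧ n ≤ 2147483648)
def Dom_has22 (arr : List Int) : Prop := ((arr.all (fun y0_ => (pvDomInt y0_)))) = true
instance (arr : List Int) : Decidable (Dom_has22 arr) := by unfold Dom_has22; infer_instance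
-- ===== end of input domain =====

-- B replaces A's guarded adjacent-pair index loop by collecting the indices of all 2s and
-- scanning the gaps between consecutive collected indices; same cost, different decomposition.

-- ===== PORT A =====
-- the 'for i in range(len(arr) - 1)' loop with early break; indices are always in range,
-- so pyGetD with default 0 is exact for arr[i] / arr[i+1]
def has22Loop (arr : List Int) : List Int → Bool
  | [] => false
  | i :: rest =>
    if PySem.List.pyGetD arr i 0 = 2 ∧ PySem.List.pyGetD arr (i + 1) 0 = 2 then true
    else has22Loop arr rest

def has22 (arr : List Int) : Bool :=
  if arr.length ≤ 1 then false
  else has22Loop arr (PySem.List.pyRange 0 ((arr.length : Int) - 1) 1)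

-- ===== PORT B =====
-- pos = [i for i, x in enumerate(arr) if x == 2]
def has22Pos (arr : List Int) : List Int :=
  ((PySem.List.enumerate arr 0).filter (fun p => p.2 == 2)).map (fun p => p.1)

-- any(b - a == 1 for a, b in zip(pos, pos[1:]))
def has22Gaps (pos : List Int) : Bool :=
  (pos.zip (pos.drop 1)).any (fun p => p.2 - p.1 == 1)

def has22_alt (arr : List Int) : Bool :=
  has22Gaps (has22Pos arr)

-- ===== PRECONDITION & SPEC =====
def Spec_has22 (arr : List Int) (out : Bool) : Prop := out = has22_alt arr
instance (arr : List Int) (out : Bool) : Decidable (Spec_has22 arr out) := by unfold Spec_has22; infer_instance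

-- ===== CLAIM (what is proved, stated in full; the proofs are below) =====
def Claim_equal_has22 : Prop := ∀ (arr : List Int), Dom_has22 arr → Spec_has22 arr (has22 arr)

-- ===== LEMMAS AND PROOFS =====

-- common reference: an adjacent pair of 2s exists
def hasAdj : List Int → Bool
  | a :: b :: t => (a == 2 && b == 2) || hasAdj (b :: t)
  | _ => false

lemma hasAdj_short (l : List Int) (h : l.length ≤ 1) : hasAdj l = false := by
  match l with
  | [] => rfl
  | [a] => rfl
  | a :: b :: t => simp at h

-- positions with an arbitrary starting offset
def posF (k : Int) : List Int → List Int
  | [] => []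
  | a :: t => if a == 2 then k :: posF (k + 1) t else posF (k + 1) t

lemma has22Pos_eq (arr : List Int) : ∀ k, ((PySem.List.enumerate arr k).filter (fun p => p.2 == 2)).map (fun p => p.1) = posF k arr := by
  induction arr with
  | nil => intro k; rfl
  | cons a t ih =>
    intro k
    simp only [PySem.List.enumerate_cons, List.filter_cons, posF]
    by_cases h : a = 2
    · simp [h, ih]
    · simp [h, ih]

lemma posF_head_ge : ∀ (t : List Int) (k j : Int), (posF k t).head? = some j → k ≤ j := by
  intro t
  induction t with
  | nil => intro k j h; simp [posF] at h
  | cons a t ih =>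
    intro k j h
    by_cases ha : a = 2
    · rw [show posF k (a :: t) = k :: posF (k + 1) t by simp [posF, ha]] at h
      simp at h; omega
    · rw [show posF k (a :: t) = posF (k + 1) t by simp [posF, ha]] at h
      have := ih (k + 1) j h
      omega

lemma posF_head_iff : ∀ (t : List Int) (k : Int), (posF k t).head? = some k ↔ t.head? = some 2 := by
  intro t
  cases t with
  | nil => intro k; simp [posF]
  | cons a t =>
    intro k
    by_cases ha : a = 2
    · simp [posF, ha]
    · rw [show posF k (a :: t) = posF (k + 1) t by simp [posF, ha]]
      constructor
      · intro h
        exact absurd (posF_head_ge t (k + 1) k h) (by omega)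
      · intro h
        simp at h
        exact absurd h ha

lemma gaps_posF : ∀ (l : List Int) (k : Int), has22Gaps (posF k l) = hasAdj l := by
  intro l
  induction l with
  | nil => intro k; rfl
  | cons a t ih =>
    intro k
    by_cases ha : a = 2
    · -- a = 2: posF k (a::t) = k :: posF (k+1) t
      rw [show posF k (a :: t) = k :: posF (k + 1) t by simp [posF, ha]]
      cases t with
      | nil => simp [posF, has22Gaps, hasAdj]
      | cons b t' =>
        have hAdj : hasAdj (a :: b :: t') = ((b == 2) || hasAdj (b :: t')) := by
          simp [hasAdj, ha]
        rw [hAdj, ← ih (k + 1)]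
        cases hP : posF (k + 1) (b :: t') with
        | nil =>
          have hb : ¬ (b :: t').head? = some 2 := by
            rw [← posF_head_iff (b :: t') (k + 1), hP]; simp
          simp at hb
          simp [has22Gaps, hb]
        | cons j P' =>
          simp only [has22Gaps, List.drop_succ_cons, List.drop_zero, List.zip_cons_cons,
            List.any_cons]
          by_cases hb : b = 2
          · have : j = k + 1 := by
              have := (posF_head_iff (b :: t') (k + 1)).2 (by simp [hb])
              rw [hP] at this; simp at this; omega
            simp [hb, this]
          · have hj1 : k + 1 ≤ j := posF_head_ge (b :: t') (k + 1) j (by rw [hP]; rfl)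
            have hj2 : j ≠ k + 1 := by
              intro hc
              have := (posF_head_iff (b :: t') (k + 1)).1 (by rw [hP, hc]; rfl)
              simp at this; exact hb this
            have : ¬ (j - k == 1) = true := by simp; omega
            simp [hb, this]
    · -- a ≠ 2
      rw [show posF k (a :: t) = posF (k + 1) t by simp [posF, ha], ih (k + 1)]
      cases t with
      | nil => rfl
      | cons b t' => simp [hasAdj, ha]

lemma loop_eq : ∀ (arr : List Int) (i : Nat), i ≤ arr.length →
    has22Loop arr (PySem.List.pyRange (i : Int) ((arr.length : Int) - 1) 1) = hasAdj (arr.drop i) := by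
  intro arr i
  induction hfuel : arr.length - i generalizing i with
  | zero =>
    intro hle
    rw [PySem.List.pyRange_one_eq_nil (by omega)]
    have : (arr.drop i).length ≤ 1 := by simp; omega
    simp [has22Loop, hasAdj_short _ this]
  | succ n ih =>
    intro hle
    by_cases hlt : i + 1 < arr.length
    · rw [PySem.List.pyRange_one_cons (by omega)]
      have hi : i < arr.length := by omega
      have hdrop : arr.drop i = arr[i] :: arr[i+1] :: arr.drop (i + 2) := by
        rw [List.drop_eq_getElem_cons hi, List.drop_eq_getElem_cons hlt]
      have hg1 : PySem.List.pyGetD arr (i : Int) 0 = arr[i] := by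
        rw [PySem.List.pyGetD_natCast]; exact List.getD_eq_getElem arr 0 hi
      have hg2 : PySem.List.pyGetD arr ((i : Int) + 1) 0 = arr[i+1] := by
        rw [show ((i : Int) + 1) = ((i + 1 : Nat) : Int) by push_cast; ring,
          PySem.List.pyGetD_natCast]
        exact List.getD_eq_getElem arr 0 hlt
      have hrest : has22Loop arr (PySem.List.pyRange ((i : Int) + 1) ((arr.length : Int) - 1) 1)
          = hasAdj (arr.drop (i + 1)) := by
        rw [show ((i : Int) + 1) = ((i + 1 : Nat) : Int) by push_cast; ring]
        exact ih (i + 1) (by omega) (by omega)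
      simp only [has22Loop, hg1, hg2, hrest, hdrop]
      have hdrop1 : arr.drop (i + 1) = arr[i+1] :: arr.drop (i + 2) := by
        rw [List.drop_eq_getElem_cons hlt]
      by_cases hc : arr[i] = 2 ∧ arr[i+1] = 2
      · simp [hasAdj, hc.1, hc.2]
      · rw [if_neg hc, hdrop1]
        have hcf : (arr[i] == 2 && arr[i + 1] == 2) = false := by
          simp only [Bool.and_eq_false_iff, beq_eq_false_iff_ne, ne_eq]
          tauto
        simp [hasAdj, hcf]
    · rw [PySem.List.pyRange_one_eq_nil (by omega)]
      have : (arr.drop i).length ≤ 1 := by simp; omega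
      simp [has22Loop, hasAdj_short _ this]

-- ===== VERDICT (by name: the statement is the Claim_ definition above) =====
theorem has22_spec : Claim_equal_has22 := by
  intro arr _
  unfold Spec_has22 has22 has22_alt
  rw [show has22Pos arr = posF 0 arr from has22Pos_eq arr 0, gaps_posF]
  by_cases h : arr.length ≤ 1
  · rw [if_pos h, hasAdj_short arr h]
  · rw [if_neg h, show (0 : Int) = ((0 : Nat) : Int) by rfl,
      loop_eq arr 0 (by omega), List.drop_zero]
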